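-- pv_equiv track=rewrite | github.com/thanosstamatakis/smart-parking | backend/webmaps/models/slots_cluster.py | _find_max_point_cluster
-- ===== SOURCE A (Python) =====
-- def _find_max_point_cluster(clusters):
--     """
--     Find the cluster or clusters with maximum parking slots.
--     """
--     max_points_clusters = list()
--     max_len = 0
--     # Get max lenth of clusters.
--     for cluster in clusters:
--         if len(cluster) > max_len:
--             max_len = len(cluster)
--     # Find clusters with max lengths.
--     max_points_clusters.append(
--         [cluster for cluster in clusters if len(cluster) == max_len])
--     max_points_clusters = max_points_clusters[0]
--
--     return max_points_clusters
-- ===== SOURCE B (Python) =====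
-- def _find_max_point_cluster(clusters):
--     """Single pass: maintain the current max length and the current winners."""
--     max_len = 0
--     result = []
--     for cluster in clusters:
--         length = len(cluster)
--         if length > max_len:
--             max_len = length
--             result = [cluster]
--         elif length == max_len:
--             result.append(cluster)
--     return result
-- ===== Notes on version B (the rewrite author's own statement) =====
-- stated objective: alternative
-- what changed: Fuses A's two passes (max-finding loop, then a filtering comprehension) into one traversal that maintains the current maximum length and the current list of winners.
import Mathlib
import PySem

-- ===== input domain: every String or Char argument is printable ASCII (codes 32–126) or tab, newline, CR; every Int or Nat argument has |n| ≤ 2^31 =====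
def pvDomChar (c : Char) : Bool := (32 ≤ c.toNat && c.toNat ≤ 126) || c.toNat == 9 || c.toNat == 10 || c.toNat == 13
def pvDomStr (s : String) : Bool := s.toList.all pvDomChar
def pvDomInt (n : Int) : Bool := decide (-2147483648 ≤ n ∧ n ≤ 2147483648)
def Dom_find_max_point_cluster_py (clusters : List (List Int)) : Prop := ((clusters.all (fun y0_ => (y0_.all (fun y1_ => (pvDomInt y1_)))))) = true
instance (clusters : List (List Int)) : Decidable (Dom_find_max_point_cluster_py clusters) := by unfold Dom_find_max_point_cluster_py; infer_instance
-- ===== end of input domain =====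

-- B fuses A's two passes (max loop, then filter) into one traversal keeping the current winners; alternative decomposition, same cost.
-- ===== PORT A =====
-- max_len = 0; for cluster in clusters: if len(cluster) > max_len: max_len = len(cluster)
-- then the comprehension [cluster for cluster in clusters if len(cluster) == max_len]
def find_max_point_cluster_py (clusters : List (List Int)) : List (List Int) :=
  let max_len : Int :=
    clusters.foldl (fun m cluster => if (cluster.length : Int) > m then (cluster.length : Int) else m) 0
  clusters.foldl (fun acc cluster => if (cluster.length : Int) = max_len then acc ++ [cluster] else acc) []

-- ===== PORT B =====
-- single pass over the clusters with state (max_len, result)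
def fmpcAltGo (max_len : Int) (result : List (List Int)) : List (List Int) → List (List Int)
  | [] => result
  | cluster :: rest =>
    let length : Int := cluster.length
    if length > max_len then fmpcAltGo length [cluster] rest
    else if length = max_len then fmpcAltGo max_len (result ++ [cluster]) rest
    else fmpcAltGo max_len result rest

def find_max_point_cluster_py_alt (clusters : List (List Int)) : List (List Int) :=
  fmpcAltGo 0 [] clusters

-- ===== PRECONDITION & SPEC =====
def Spec_find_max_point_cluster_py (clusters : List (List Int)) (out : List (List Int)) : Prop := out = find_max_point_cluster_py_alt clusters
instance (clusters : List (List Int)) (out : List (List Int)) : Decidable (Spec_find_max_point_cluster_py clusters out) := by unfold Spec_find_max_point_cluster_py; infer_instance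

-- ===== CLAIM (what is proved, stated in full; the proofs are below) =====
def Claim_equal_find_max_point_cluster_py : Prop := ∀ (clusters : List (List Int)), Dom_find_max_point_cluster_py clusters → Spec_find_max_point_cluster_py clusters (find_max_point_cluster_py clusters)

-- ===== LEMMAS AND PROOFS =====

-- ===== VERDICT (by name: the statement is the Claim_ definition above) =====
-- final max starting from m (exactly A's first fold)
def fmpcMax (m : Int) (xs : List (List Int)) : Int :=
  xs.foldl (fun m cluster => if (cluster.length : Int) > m then (cluster.length : Int) else m) m

theorem fmpcMax_le (m : Int) (xs : List (List Int)) : m ≤ fmpcMax m xs := by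
  induction xs generalizing m with
  | nil => simp [fmpcMax]
  | cons c rest ih =>
    simp only [fmpcMax, List.foldl] at *
    split_ifs with h
    · exact le_trans (le_of_lt h) (ih _)
    · exact ih m

theorem fmpcMax_cons (m : Int) (c : List Int) (rest : List (List Int)) :
    fmpcMax m (c :: rest) = fmpcMax (if (c.length : Int) > m then (c.length : Int) else m) rest := by
  simp [fmpcMax, List.foldl]

theorem fmpcGo_spec (xs : List (List Int)) (m : Int) (acc : List (List Int)) :
    fmpcAltGo m acc xs =
      (if fmpcMax m xs = m then acc else []) ++
        xs.filter (fun cluster => decide ((cluster.length : Int) = fmpcMax m xs)) := by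
  induction xs generalizing m acc with
  | nil => simp [fmpcAltGo, fmpcMax]
  | cons c rest ih =>
    by_cases h1 : (c.length : Int) > m
    · have hM : fmpcMax m (c :: rest) = fmpcMax (c.length : Int) rest := by
        rw [fmpcMax_cons]; simp [h1]
      have hle : (c.length : Int) ≤ fmpcMax (c.length : Int) rest := fmpcMax_le _ _
      have hne : ¬ (fmpcMax (c.length : Int) rest = m) := by omega
      simp only [fmpcAltGo, if_pos h1, ih, hM, List.filter]
      by_cases h2 : fmpcMax (c.length : Int) rest = (c.length : Int)
      · simp [h2, show ¬ ((c.length : Int) = m) by omega]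
      · have hcne : ¬ ((c.length : Int) = fmpcMax (c.length : Int) rest) := fun he => h2 he.symm
        simp [h2, hcne, hne]
    · have hM : fmpcMax m (c :: rest) = fmpcMax m rest := by
        rw [fmpcMax_cons]; simp [h1]
      by_cases h2 : (c.length : Int) = m
      · simp only [fmpcAltGo, if_neg h1, if_pos h2, ih, hM, List.filter]
        by_cases h3 : fmpcMax m rest = m
        · have : (c.length : Int) = fmpcMax m rest := by omega
          simp [h3, this]
        · have : ¬ ((c.length : Int) = fmpcMax m rest) := by omega
          simp [h3, this]
      · have hge : m ≤ fmpcMax m rest := fmpcMax_le _ _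
        have hcne : ¬ ((c.length : Int) = fmpcMax m rest) := by omega
        simp only [fmpcAltGo, if_neg h1, if_neg h2, ih, hM, List.filter]
        simp [hcne]

theorem find_max_point_cluster_py_spec : Claim_equal_find_max_point_cluster_py := by
  intro clusters _
  unfold Spec_find_max_point_cluster_py find_max_point_cluster_py find_max_point_cluster_py_alt
  rw [fmpcGo_spec]
  rw [show (clusters.foldl (fun m cluster => if (cluster.length : Int) > m then (cluster.length : Int) else m) 0) = fmpcMax 0 clusters from rfl]
  rw [PySem.List.foldl_append_ite_eq_filter]
  split_ifs <;> simp
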